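-- pv_equiv track=rewrite | github.com/kore-01/daily | src/scoring/analyzer_integration.py | _extract_sentiment_data
-- ===== SOURCE A (Python) =====
-- from typing import Dict, Any, Optional
--
-- def _extract_sentiment_data(context: Dict) -> Dict[str, Any]:
--     """提取情绪数据"""
--     data = {}
--
--     # 从news提取
--     news = context.get('news', [])
--     if news:
--         # 简单统计新闻情绪
--         positive = sum(1 for n in news if n.get('sentiment') == 'positive')
--         negative = sum(1 for n in news if n.get('sentiment') == 'negative')
--         total = len(news)
--
--         if total > 0:
--             if positive > negative:
--                 data['news_sentiment'] = 'positive'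
--             elif negative > positive:
--                 data['news_sentiment'] = 'negative'
--             else:
--                 data['news_sentiment'] = 'neutral'
--
--     return data
-- ===== SOURCE B (Python) =====
-- def _extract_sentiment_data(context):
--     """提取情绪数据 — single-pass signed tally instead of two counting passes."""
--     news = context.get('news', [])
--     if not news:
--         return {}
--     net = 0
--     for n in news:
--         s = n.get('sentiment')
--         if s == 'positive':
--             net += 1
--         elif s == 'negative':
--             net -= 1
--     return {'news_sentiment': 'positive' if net > 0 else ('negative' if net < 0 else 'neutral')}
-- ===== Notes on version B (the rewrite author's own statement) =====
-- stated objective: simpler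
-- what changed: Replaces the two separate counting passes over news (positive count, negative count, then comparison) with a single pass accumulating one signed net score whose sign gives the label directly.
import Mathlib
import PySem

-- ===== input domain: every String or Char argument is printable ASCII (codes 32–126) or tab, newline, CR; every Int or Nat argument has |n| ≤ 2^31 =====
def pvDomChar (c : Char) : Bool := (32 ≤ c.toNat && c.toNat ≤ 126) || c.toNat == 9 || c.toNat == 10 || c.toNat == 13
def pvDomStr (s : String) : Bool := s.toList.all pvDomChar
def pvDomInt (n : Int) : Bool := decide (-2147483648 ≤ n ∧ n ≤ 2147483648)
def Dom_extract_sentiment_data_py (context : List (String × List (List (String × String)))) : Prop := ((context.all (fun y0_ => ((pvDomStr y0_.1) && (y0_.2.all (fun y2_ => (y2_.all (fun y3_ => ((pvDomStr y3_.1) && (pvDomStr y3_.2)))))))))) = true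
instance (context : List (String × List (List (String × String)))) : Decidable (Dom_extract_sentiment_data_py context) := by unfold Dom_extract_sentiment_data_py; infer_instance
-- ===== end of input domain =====

-- B replaces A's two counting passes over news with a single signed-net-score pass (simpler).


-- ===== PORT A =====
-- context.get('news', []) / n.get('sentiment'): first-match lookup on the association list
def extract_sentiment_data_py (context : List (String × List (List (String × String)))) : List (String × String) :=
  let data : List (String × String) := []
  let news := (List.lookup "news" context).getD []
  if news ≠ [] then
    let positive : Int := news.foldl (fun acc n => acc + if List.lookup "sentiment" n = some "positive" then 1 else 0) 0
    let negative : Int := news.foldl (fun acc n => acc + if List.lookup "sentiment" n = some "negative" then 1 else 0) 0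
    let total : Int := (news.length : Int)
    if total > 0 then
      if positive > negative then data ++ [("news_sentiment", "positive")]
      else if negative > positive then data ++ [("news_sentiment", "negative")]
      else data ++ [("news_sentiment", "neutral")]
    else data
  else data

-- ===== PORT B =====
def pvSentVal (n : List (String × String)) : Int :=
  match List.lookup "sentiment" n with
  | some "positive" => 1
  | some "negative" => -1
  | _ => 0

def extract_sentiment_data_py_alt (context : List (String × List (List (String × String)))) : List (String × String) :=
  let news := (List.lookup "news" context).getD []
  if news = [] then []
  else
    let net : Int := news.foldl (fun acc n => acc + pvSentVal n) 0
    [("news_sentiment", if net > 0 then "positive" else if net < 0 then "negative" else "neutral")]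

-- ===== PRECONDITION & SPEC =====
def Spec_extract_sentiment_data_py (context : List (String × List (List (String × String)))) (out : List (String × String)) : Prop := out = extract_sentiment_data_py_alt context
instance (context : List (String × List (List (String × String)))) (out : List (String × String)) : Decidable (Spec_extract_sentiment_data_py context out) := by unfold Spec_extract_sentiment_data_py; infer_instance

-- ===== CLAIM (what is proved, stated in full; the proofs are below) =====
def Claim_equal_extract_sentiment_data_py : Prop := ∀ (context : List (String × List (List (String × String)))), Dom_extract_sentiment_data_py context → Spec_extract_sentiment_data_py context (extract_sentiment_data_py context)

-- ===== LEMMAS AND PROOFS =====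
theorem pv_foldl_add_map {α : Type} (f : α → Int) (l : List α) (a : Int) :
    l.foldl (fun acc n => acc + f n) a = a + (l.map f).sum := by
  induction l generalizing a with
  | nil => simp
  | cons x xs ih => simp [List.foldl, ih (a + f x)]; ring

theorem pv_net_eq (news : List (List (String × String))) :
    (news.map pvSentVal).sum =
      (news.map (fun n => if List.lookup "sentiment" n = some "positive" then (1 : Int) else 0)).sum
      - (news.map (fun n => if List.lookup "sentiment" n = some "negative" then (1 : Int) else 0)).sum := by
  induction news with
  | nil => simp
  | cons x xs ih =>
    simp only [List.map_cons, List.sum_cons, ih]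
    have : pvSentVal x = (if List.lookup "sentiment" x = some "positive" then (1 : Int) else 0)
        - (if List.lookup "sentiment" x = some "negative" then (1 : Int) else 0) := by
      unfold pvSentVal
      rcases hx : List.lookup "sentiment" x with _ | v
      · simp
      · by_cases hp : v = "positive"
        · simp [hp]
        · by_cases hn : v = "negative"
          · simp [hp, hn]
          · simp [hp, hn]
    rw [this]; ring

-- ===== VERDICT (by name: the statement is the Claim_ definition above) =====
theorem extract_sentiment_data_py_spec : Claim_equal_extract_sentiment_data_py := by
  intro context _
  unfold Spec_extract_sentiment_data_py extract_sentiment_data_py extract_sentiment_data_py_alt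
  set news := (List.lookup "news" context).getD [] with hnews
  by_cases h : news = []
  · simp [h]
  · simp only [h, if_neg, ne_eq, not_false_eq_true, if_true]
    rw [pv_foldl_add_map, pv_foldl_add_map, pv_foldl_add_map, pv_net_eq]
    set P := (news.map (fun n => if List.lookup "sentiment" n = some "positive" then (1 : Int) else 0)).sum
    set N := (news.map (fun n => if List.lookup "sentiment" n = some "negative" then (1 : Int) else 0)).sum
    have hlen : (0 : Int) < news.length := by
      exact_mod_cast List.length_pos_of_ne_nil h
    simp only [zero_add, hlen, if_true]
    by_cases h1 : P > N
    · simp [h1]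
    · by_cases h2 : N > P
      · simp [h1, h2]
      · simp [h1, h2]
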